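-- pv_equiv track=rewrite | github.com/zxia545/virtualhome_pddl_simulator | utils.py | allocate_gpus
-- ===== SOURCE A (Python) =====
-- from typing import Dict, Any, List
--
-- def allocate_gpus(total_gpus: int, processes: int) -> List[List[int]]:
--     """
--     Allocate GPUs for multiple processes.
--
--     Parameters:
--     total_gpus: int - Total number of GPUs available.
--     processes: int - Number of processes to allocate GPUs for.
--
--     Returns:
--     List[List[int]] - A list where each sublist contains the GPUs assigned to a process.
--     """
--     if total_gpus < processes:
--         raise ValueError("Not enough GPUs available for the number of processes.")
--
--     gpus_per_process = total_gpus // processes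
--     extra_gpus = total_gpus % processes
--
--     allocation = []
--     start = 0
--
--     for i in range(processes):
--         end = start + gpus_per_process + (1 if i < extra_gpus else 0)
--         allocation.append(list(range(start, end)))
--         start = end
--
--     return allocation
-- ===== SOURCE B (Python) =====
-- from typing import List
--
-- def allocate_gpus(total_gpus: int, processes: int) -> List[List[int]]:
--     if total_gpus < processes:
--         raise ValueError("Not enough GPUs available for the number of processes.")
--     gpus_per_process = total_gpus // processes
--     extra_gpus = total_gpus % processes
--     return [
--         list(range(i * gpus_per_process + min(i, extra_gpus),
--                    i * gpus_per_process + min(i, extra_gpus)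
--                    + gpus_per_process + (1 if i < extra_gpus else 0)))
--         for i in range(processes)
--     ]
-- ===== Notes on version B (the rewrite author's own statement) =====
-- stated objective: simpler
-- what changed: Replaced the sequential running-start accumulator loop by a comprehension computing each process's range independently from the closed form start_i = i*q + min(i, r).
import Mathlib
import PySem

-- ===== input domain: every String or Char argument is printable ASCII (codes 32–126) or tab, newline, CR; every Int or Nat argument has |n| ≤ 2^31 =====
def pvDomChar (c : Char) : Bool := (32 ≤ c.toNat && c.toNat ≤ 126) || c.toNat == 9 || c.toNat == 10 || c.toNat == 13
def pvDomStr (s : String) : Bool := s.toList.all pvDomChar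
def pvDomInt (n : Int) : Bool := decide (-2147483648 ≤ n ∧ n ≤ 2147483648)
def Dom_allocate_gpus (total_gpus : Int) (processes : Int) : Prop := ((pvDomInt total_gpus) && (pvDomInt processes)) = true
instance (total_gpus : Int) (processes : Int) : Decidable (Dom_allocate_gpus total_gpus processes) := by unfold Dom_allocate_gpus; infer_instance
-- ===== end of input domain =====

-- B replaces A's running-start accumulator loop by independent per-index closed-form ranges (start_i = i*q + min i r): simpler decomposition, same cost.


-- ===== PORT A =====
-- literal port of A: guard (excluded by Pre_), then a loop carrying (allocation, start)
def allocate_gpus (total_gpus : Int) (processes : Int) : List (List Int) :=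
  let gpus_per_process := PySem.Int.floordiv total_gpus processes
  let extra_gpus := PySem.Int.mod total_gpus processes
  let st := (PySem.List.pyRange 0 processes 1).foldl
    (fun (acc : List (List Int) × Int) i =>
      let e := acc.2 + gpus_per_process + (if i < extra_gpus then 1 else 0)
      (acc.1 ++ [PySem.List.pyRange acc.2 e 1], e))
    ([], 0)
  st.1

-- ===== PORT B =====
-- literal port of B: each sublist computed independently from the closed form
def allocate_gpus_alt (total_gpus : Int) (processes : Int) : List (List Int) :=
  let q := PySem.Int.floordiv total_gpus processes
  let r := PySem.Int.mod total_gpus processes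
  (PySem.List.pyRange 0 processes 1).map (fun i =>
    PySem.List.pyRange (i * q + min i r)
      (i * q + min i r + q + (if i < r then 1 else 0)) 1)

-- ===== PRECONDITION & SPEC =====
-- Pre_ excludes exactly the inputs where A raises: total_gpus < processes (ValueError) and processes = 0 (ZeroDivisionError).
def Pre_allocate_gpus (total_gpus : Int) (processes : Int) : Prop :=
  processes ≠ 0 ∧ processes ≤ total_gpus
instance (total_gpus : Int) (processes : Int) : Decidable (Pre_allocate_gpus total_gpus processes) := by unfold Pre_allocate_gpus; infer_instance
def pvWitness_allocate_gpus : Int × Int := (7, 3)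

def Spec_allocate_gpus (total_gpus : Int) (processes : Int) (out : List (List Int)) : Prop := out = allocate_gpus_alt total_gpus processes
instance (total_gpus : Int) (processes : Int) (out : List (List Int)) : Decidable (Spec_allocate_gpus total_gpus processes out) := by unfold Spec_allocate_gpus; infer_instance

-- ===== CLAIM (what is proved, stated in full; the proofs are below) =====
def Claim_equal_allocate_gpus : Prop := ∀ (total_gpus : Int) (processes : Int), Dom_allocate_gpus total_gpus processes → Pre_allocate_gpus total_gpus processes → Spec_allocate_gpus total_gpus processes (allocate_gpus total_gpus processes)

-- ===== LEMMAS AND PROOFS =====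

-- A's loop over range(0, n) ends with start = n*q + min n r and accumulates exactly B's closed-form ranges.
theorem allocate_loop_closed (q r : Int) (hr : 0 ≤ r) (n : Nat) :
    (PySem.List.pyRange 0 (n : Int) 1).foldl
      (fun (acc : List (List Int) × Int) i =>
        (acc.1 ++ [PySem.List.pyRange acc.2 (acc.2 + q + (if i < r then 1 else 0)) 1],
         acc.2 + q + (if i < r then 1 else 0)))
      ([], 0)
    = ((PySem.List.pyRange 0 (n : Int) 1).map (fun i =>
         PySem.List.pyRange (i * q + min i r)
           (i * q + min i r + q + (if i < r then 1 else 0)) 1),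
       (n : Int) * q + min (n : Int) r) := by
  induction n with
  | zero =>
      simp [PySem.List.pyRange_one_eq_nil]
      omega
  | succ n ih =>
      have hc : ((n + 1 : Nat) : Int) = (n : Int) + 1 := by push_cast; ring
      rw [hc, PySem.List.pyRange_one_succ_right (by positivity), List.foldl_append,
        List.map_append, ih]
      simp only [List.foldl_cons, List.foldl_nil, List.map_cons, List.map_nil,
        Prod.mk.injEq]
      refine ⟨trivial, ?_⟩
      have h1 : ((n : Int) + 1) * q = (n : Int) * q + q := by ring
      rw [h1]
      simp only [min_def]
      split_ifs <;> omega

theorem allocate_gpus_equal (total_gpus processes : Int)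
    (hpre : Pre_allocate_gpus total_gpus processes) :
    allocate_gpus total_gpus processes = allocate_gpus_alt total_gpus processes := by
  obtain ⟨hne, _hle⟩ := hpre
  by_cases hp : 0 < processes
  · have hr : 0 ≤ PySem.Int.mod total_gpus processes := PySem.Int.mod_nonneg _ hp
    have hcast : processes = ((processes.toNat : Nat) : Int) := by omega
    simp only [allocate_gpus, allocate_gpus_alt]
    set q := PySem.Int.floordiv total_gpus processes with hq
    set r := PySem.Int.mod total_gpus processes with hrdef
    rw [hcast, allocate_loop_closed q r hr]
  · have hnil : PySem.List.pyRange 0 processes 1 = [] :=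
      PySem.List.pyRange_one_eq_nil (by omega)
    simp only [allocate_gpus, allocate_gpus_alt, hnil, List.foldl_nil, List.map_nil]

-- ===== VERDICT (by name: the statement is the Claim_ definition above) =====
theorem allocate_gpus_spec : Claim_equal_allocate_gpus := by
  intro total_gpus processes _hdom hpre
  exact allocate_gpus_equal total_gpus processes hpre
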